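-- pv_equiv track=rewrite | github.com/dr0pdev/handwriting_gen | generate.py | pad_text
-- ===== SOURCE A (Python) =====
-- def pad_text(text: str, target_min: int = 35, target_max: int = 61) -> str:
--     """Repeat a short text phrase to reach a minimum target length."""
--     text = text.strip()
--     if len(text) >= target_min:
--         return text
--     unit = " " + text
--     out = text
--     while len(out) + len(unit) <= target_max:
--         out += unit
--     if len(out) < target_min:
--         out += unit
--     return out
-- ===== SOURCE B (Python) =====
-- def pad_text(text: str, target_min: int = 35, target_max: int = 61) -> str:
--     """Repeat a short text phrase to reach a minimum target length."""
--     text = text.strip()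
--     if len(text) >= target_min:
--         return text
--     unit = " " + text
--     n = (target_max - len(text)) // (len(text) + 1)
--     out = text + unit * n
--     if len(out) < target_min:
--         out += unit
--     return out
-- ===== Notes on version B (the rewrite author's own statement) =====
-- stated objective: simpler
-- what changed: The incremental while-loop that appends one unit at a time is replaced by a closed-form repeat count n = (target_max - len)//(len + 1) and a single string multiplication, keeping the final target_min top-up.
import Mathlib
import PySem

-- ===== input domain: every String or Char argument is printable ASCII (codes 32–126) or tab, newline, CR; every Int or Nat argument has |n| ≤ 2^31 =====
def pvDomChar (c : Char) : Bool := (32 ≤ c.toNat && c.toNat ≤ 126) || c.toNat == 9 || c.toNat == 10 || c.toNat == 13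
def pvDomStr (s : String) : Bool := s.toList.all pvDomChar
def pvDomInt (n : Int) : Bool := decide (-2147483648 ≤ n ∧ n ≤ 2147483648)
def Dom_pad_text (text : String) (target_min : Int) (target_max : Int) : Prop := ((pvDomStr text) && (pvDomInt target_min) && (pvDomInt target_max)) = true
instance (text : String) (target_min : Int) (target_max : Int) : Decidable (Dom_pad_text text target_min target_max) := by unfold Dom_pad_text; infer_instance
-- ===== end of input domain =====

-- B replaces A's one-unit-at-a-time while-loop by a closed-form repeat count (simpler).

-- ===== PORT A =====
-- the while loop: while len(out) + len(unit) <= target_max: out += unit, with unit = ' ' :: t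
def padLoopA (t : List Char) (M : Int) (out : List Char) : List Char :=
  if ((out.length : Int)) + ((t.length : Int) + 1) ≤ M then
    padLoopA t M (out ++ (' ' :: t))
  else out
termination_by (M - out.length).toNat
decreasing_by simp only [List.length_append, List.length_cons]; omega

def pad_text (text : String) (target_min : Int) (target_max : Int) : String :=
  let t := PySem.Chars.strip text.toList
  if (t.length : Int) ≥ target_min then String.ofList t
  else
    let out := padLoopA t target_max t
    let out := if (out.length : Int) < target_min then out ++ (' ' :: t) else out
    String.ofList out

-- ===== PORT B =====
def pad_text_alt (text : String) (target_min : Int) (target_max : Int) : String :=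
  let t := PySem.Chars.strip text.toList
  if (t.length : Int) ≥ target_min then String.ofList t
  else
    -- n = (target_max - len(text)) // (len(text) + 1); unit * n with negative n is '' (toNat clamps)
    let n := PySem.Int.floordiv (target_max - (t.length : Int)) ((t.length : Int) + 1)
    let out := t ++ (List.replicate n.toNat (' ' :: t)).flatten
    let out := if (out.length : Int) < target_min then out ++ (' ' :: t) else out
    String.ofList out

-- ===== PRECONDITION & SPEC =====
def Spec_pad_text (text : String) (target_min : Int) (target_max : Int) (out : String) : Prop := out = pad_text_alt text target_min target_max
instance (text : String) (target_min : Int) (target_max : Int) (out : String) : Decidable (Spec_pad_text text target_min target_max out) := by unfold Spec_pad_text; infer_instance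

-- ===== CLAIM (what is proved, stated in full; the proofs are below) =====
def Claim_equal_pad_text : Prop := ∀ (text : String) (target_min : Int) (target_max : Int), Dom_pad_text text target_min target_max → Spec_pad_text text target_min target_max (pad_text text target_min target_max)

-- ===== LEMMAS AND PROOFS =====

-- The loop appends exactly floor((M - len out)/(len t + 1)) units (0 if that is negative).
theorem padLoopA_eq (t : List Char) (M : Int) (out : List Char) :
    padLoopA t M out =
      out ++ (List.replicate (PySem.Int.floordiv (M - (out.length : Int)) ((t.length : Int) + 1)).toNat (' ' :: t)).flatten := by
  induction out using padLoopA.induct t M with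
  | case1 out h ih =>
    rw [padLoopA, if_pos h, ih]
    have hu : (0:Int) < (t.length : Int) + 1 := by omega
    set u : Int := (t.length : Int) + 1 with hud
    set n : Int := PySem.Int.floordiv (M - (out.length : Int)) u with hn
    have hbr : n * u ≤ M - (out.length : Int) ∧ M - (out.length : Int) < (n + 1) * u :=
      (PySem.Int.floordiv_eq_iff_of_pos hu).mp hn.symm
    have h2 : PySem.Int.floordiv (M - ((out ++ (' ' :: t)).length : Int)) u = n - 1 := by
      have hlen : ((out ++ (' ' :: t)).length : Int) = (out.length : Int) + u := by
        simp [List.length_append]; omega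
      have e1 : (n - 1) * u = n * u - u := by ring
      have e2 : (n - 1 + 1) * u = n * u := by ring
      have e3 : (n + 1) * u = n * u + u := by ring
      rw [hlen]
      exact (PySem.Int.floordiv_eq_iff_of_pos hu).mpr ⟨by omega, by omega⟩
    have hn1 : 1 ≤ n := by
      rw [hn]
      rw [PySem.Int.le_floordiv_iff_mul_le hu]
      omega
    have htn : n.toNat = (n - 1).toNat + 1 := by omega
    rw [h2, htn, List.replicate_succ, List.flatten_cons, List.append_assoc]
  | case2 out h =>
    rw [padLoopA, if_neg h]
    have hu : (0:Int) < (t.length : Int) + 1 := by omega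
    have hlt : PySem.Int.floordiv (M - (out.length : Int)) ((t.length : Int) + 1) < 1 := by
      rw [PySem.Int.floordiv_lt_iff_lt_mul hu]
      omega
    have h0 : (PySem.Int.floordiv (M - (out.length : Int)) ((t.length : Int) + 1)).toNat = 0 := by omega
    rw [h0]
    simp

-- ===== VERDICT (by name: the statement is the Claim_ definition above) =====
theorem pad_text_spec : Claim_equal_pad_text := by
  intro text target_min target_max _
  unfold Spec_pad_text pad_text pad_text_alt
  simp only [padLoopA_eq]
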